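-- pv_equiv track=rewrite | github.com/LivingFutureLab/Comet | talos/task/comet/utils.py | calc_static_chunk_sizes
-- ===== SOURCE A (Python) =====
-- import math
--
-- def calc_static_chunk_sizes(
--     seq_length: int,
--     chunk_size: int,
--     global_mem_size: int,
--     temp_beacon_stride: int,
--     tem_mem_budget: int,
-- ):
--     assert seq_length % chunk_size == 0
--     num_chunks = seq_length // chunk_size
--     chunk_sizes = [chunk_size] * num_chunks
--
--     if temp_beacon_stride > 0:
--         num_beacons = math.ceil(chunk_size / temp_beacon_stride)
--     else:
--         num_beacons = 0
--     num_temp_mem = 0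
--     for i in range(num_chunks):
--         if i > 0:
--             chunk_sizes[i] += num_temp_mem + global_mem_size
--         chunk_sizes[i] += global_mem_size + num_beacons
--         num_temp_mem = min(tem_mem_budget, num_temp_mem + num_beacons)
--     return chunk_sizes
-- ===== SOURCE B (Python) =====
-- import math
--
-- def calc_static_chunk_sizes(
--     seq_length: int,
--     chunk_size: int,
--     global_mem_size: int,
--     temp_beacon_stride: int,
--     tem_mem_budget: int,
-- ):
--     assert seq_length % chunk_size == 0
--     num_chunks = seq_length // chunk_size
--
--     if temp_beacon_stride > 0:
--         num_beacons = math.ceil(chunk_size / temp_beacon_stride)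
--     else:
--         num_beacons = 0
--     base = chunk_size + global_mem_size + num_beacons
--     return [
--         base if i == 0
--         else base + global_mem_size + min(tem_mem_budget, i * num_beacons)
--         for i in range(num_chunks)
--     ]
-- ===== Notes on version B (the rewrite author's own statement) =====
-- stated objective: alternative
-- what changed: Replaces the stateful loop that mutates a pre-built list and threads a capped temp-memory accumulator with a single list comprehension using the budget-capped closed form min(tem_mem_budget, i*num_beacons) for the accumulator at step i.
-- intended difference: On degenerate inputs where chunk_size is negative enough that num_beacons = ceil(chunk_size/stride) < 0, tem_mem_budget < num_beacons and there are at least 3 chunks, A's accumulator min(budget, tm+num_beacons) drifts ever further below the budget cap (the cap fires once and then keeps adding the negative num_beacons), while B returns the capped accumulation min(budget, i*num_beacons); B's value is the intended one because the budget is a cap on used temp memory, not a level to sink below. — e.g. on calc_static_chunk_sizes(-6, -2, 1, 1, -5): A returns [-3, -7, -9], B returns [-3, -7, -7]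
import Mathlib
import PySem

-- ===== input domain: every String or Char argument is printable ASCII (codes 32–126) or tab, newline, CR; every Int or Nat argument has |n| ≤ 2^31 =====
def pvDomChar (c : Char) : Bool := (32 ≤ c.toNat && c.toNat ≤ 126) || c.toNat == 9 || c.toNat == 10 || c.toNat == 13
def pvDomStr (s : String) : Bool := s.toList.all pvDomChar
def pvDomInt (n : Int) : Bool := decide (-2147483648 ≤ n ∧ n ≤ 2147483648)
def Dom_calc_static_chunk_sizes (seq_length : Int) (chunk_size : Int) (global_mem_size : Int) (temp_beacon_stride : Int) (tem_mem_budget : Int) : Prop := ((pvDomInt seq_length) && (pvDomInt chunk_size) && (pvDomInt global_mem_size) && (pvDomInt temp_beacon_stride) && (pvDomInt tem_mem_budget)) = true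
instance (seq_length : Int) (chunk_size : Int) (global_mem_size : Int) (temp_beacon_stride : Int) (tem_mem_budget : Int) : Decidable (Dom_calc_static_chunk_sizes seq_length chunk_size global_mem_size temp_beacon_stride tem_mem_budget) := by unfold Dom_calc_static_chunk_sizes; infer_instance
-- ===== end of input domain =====

-- B replaces A's stateful loop (list mutation + capped accumulator) by a list comprehension using
-- the closed form min(tem_mem_budget, i*num_beacons); same O(n) cost, alternative decomposition.
-- On a degenerate corner (negative chunk_size making num_beacons negative, with a budget below it,
-- ≥ 3 chunks) the two return different values; see D_ below. Return-value equivalence only.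

-- ===== PORT A =====
-- A's loop body (reads chunk_sizes[i], adds, writes back; updates the capped accumulator).
-- math.ceil(chunk_size / temp_beacon_stride) is exact integer ceiling division for |int| ≤ 2^31
-- (the float quotient cannot cross an integer), ported as -((-chunk_size) // temp_beacon_stride).
def stepA (gm nb budget : Int) (st : List Int × Int) (i : Int) : List Int × Int :=
  let cs := st.1
  let tm := st.2
  let cs1 := if i > 0 then PySem.List.pySetD cs i (PySem.List.pyGetD cs i 0 + (tm + gm)) else cs
  let cs2 := PySem.List.pySetD cs1 i (PySem.List.pyGetD cs1 i 0 + (gm + nb))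
  (cs2, min budget (tm + nb))

def calc_static_chunk_sizes (seq_length : Int) (chunk_size : Int) (global_mem_size : Int) (temp_beacon_stride : Int) (tem_mem_budget : Int) : List Int :=
  let num_chunks := PySem.Int.floordiv seq_length chunk_size
  let chunk_sizes := PySem.List.pyRepeat [chunk_size] num_chunks
  let num_beacons := if temp_beacon_stride > 0 then -(PySem.Int.floordiv (-chunk_size) temp_beacon_stride) else 0
  let res := (PySem.List.pyRange 0 num_chunks 1).foldl (stepA global_mem_size num_beacons tem_mem_budget) (chunk_sizes, 0)
  res.1

-- ===== PORT B =====
def calc_static_chunk_sizes_alt (seq_length : Int) (chunk_size : Int) (global_mem_size : Int) (temp_beacon_stride : Int) (tem_mem_budget : Int) : List Int :=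
  let num_chunks := PySem.Int.floordiv seq_length chunk_size
  let num_beacons := if temp_beacon_stride > 0 then -(PySem.Int.floordiv (-chunk_size) temp_beacon_stride) else 0
  let base := chunk_size + global_mem_size + num_beacons
  (PySem.List.pyRange 0 num_chunks 1).map (fun i =>
    if i = 0 then base
    else base + global_mem_size + min tem_mem_budget (i * num_beacons))

-- ===== PRECONDITION & SPEC =====
-- Pre_ excludes exactly where Python A raises: chunk_size = 0 (ZeroDivisionError) and
-- seq_length % chunk_size ≠ 0 (AssertionError); B raises identically there.
def Pre_calc_static_chunk_sizes (seq_length : Int) (chunk_size : Int) (global_mem_size : Int) (temp_beacon_stride : Int) (tem_mem_budget : Int) : Prop :=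
  chunk_size ≠ 0 ∧ PySem.Int.mod seq_length chunk_size = 0
instance (seq_length : Int) (chunk_size : Int) (global_mem_size : Int) (temp_beacon_stride : Int) (tem_mem_budget : Int) : Decidable (Pre_calc_static_chunk_sizes seq_length chunk_size global_mem_size temp_beacon_stride tem_mem_budget) := by unfold Pre_calc_static_chunk_sizes; infer_instance

def pvWitness_calc_static_chunk_sizes : Int × Int × Int × Int × Int := (8, 2, 1, 1, 3)

-- On degenerate inputs where chunk_size is negative enough that num_beacons = ceil(chunk_size/stride)
-- is negative, tem_mem_budget < num_beacons and there are at least 3 chunks, A's accumulator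
-- min(budget, tm + num_beacons) drifts below the budget (the cap acts once and then keeps adding the
-- negative num_beacons), while B returns the budget-capped accumulation min(budget, i*num_beacons);
-- B's value is the intended one: the budget is a cap, not a value to sink below.
def D_calc_static_chunk_sizes (seq_length : Int) (chunk_size : Int) (global_mem_size : Int) (temp_beacon_stride : Int) (tem_mem_budget : Int) : Prop :=
  0 < temp_beacon_stride ∧ chunk_size ≤ -temp_beacon_stride ∧
  tem_mem_budget * temp_beacon_stride < chunk_size ∧ seq_length ≤ 3 * chunk_size
instance (seq_length : Int) (chunk_size : Int) (global_mem_size : Int) (temp_beacon_stride : Int) (tem_mem_budget : Int) : Decidable (D_calc_static_chunk_sizes seq_length chunk_size global_mem_size temp_beacon_stride tem_mem_budget) := by unfold D_calc_static_chunk_sizes; infer_instance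

def Spec_calc_static_chunk_sizes (seq_length : Int) (chunk_size : Int) (global_mem_size : Int) (temp_beacon_stride : Int) (tem_mem_budget : Int) (out : List Int) : Prop := ¬ D_calc_static_chunk_sizes seq_length chunk_size global_mem_size temp_beacon_stride tem_mem_budget → out = calc_static_chunk_sizes_alt seq_length chunk_size global_mem_size temp_beacon_stride tem_mem_budget
instance (seq_length : Int) (chunk_size : Int) (global_mem_size : Int) (temp_beacon_stride : Int) (tem_mem_budget : Int) (out : List Int) : Decidable (Spec_calc_static_chunk_sizes seq_length chunk_size global_mem_size temp_beacon_stride tem_mem_budget out) := by unfold Spec_calc_static_chunk_sizes; infer_instance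

def pvDiffWitness_calc_static_chunk_sizes : Int × Int × Int × Int × Int := (-6, -2, 1, 1, -5)
def pvDiffWitnessOut_calc_static_chunk_sizes : (List Int) × (List Int) := ([-3, -7, -9], [-3, -7, -7])

-- ===== CLAIM (what is proved, stated in full; the proofs are below) =====
def Claim_unchanged_calc_static_chunk_sizes : Prop := ∀ (seq_length : Int) (chunk_size : Int) (global_mem_size : Int) (temp_beacon_stride : Int) (tem_mem_budget : Int), Dom_calc_static_chunk_sizes seq_length chunk_size global_mem_size temp_beacon_stride tem_mem_budget → Pre_calc_static_chunk_sizes seq_length chunk_size global_mem_size temp_beacon_stride tem_mem_budget → Spec_calc_static_chunk_sizes seq_length chunk_size global_mem_size temp_beacon_stride tem_mem_budget (calc_static_chunk_sizes seq_length chunk_size global_mem_size temp_beacon_stride tem_mem_budget)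
def Claim_changed_calc_static_chunk_sizes : Prop := Dom_calc_static_chunk_sizes (pvDiffWitness_calc_static_chunk_sizes.1) (pvDiffWitness_calc_static_chunk_sizes.2.1) (pvDiffWitness_calc_static_chunk_sizes.2.2.1) (pvDiffWitness_calc_static_chunk_sizes.2.2.2.1) (pvDiffWitness_calc_static_chunk_sizes.2.2.2.2) ∧ Pre_calc_static_chunk_sizes (pvDiffWitness_calc_static_chunk_sizes.1) (pvDiffWitness_calc_static_chunk_sizes.2.1) (pvDiffWitness_calc_static_chunk_sizes.2.2.1) (pvDiffWitness_calc_static_chunk_sizes.2.2.2.1) (pvDiffWitness_calc_static_chunk_sizes.2.2.2.2) ∧ D_calc_static_chunk_sizes (pvDiffWitness_calc_static_chunk_sizes.1) (pvDiffWitness_calc_static_chunk_sizes.2.1) (pvDiffWitness_calc_static_chunk_sizes.2.2.1) (pvDiffWitness_calc_static_chunk_sizes.2.2.2.1) (pvDiffWitness_calc_static_chunk_sizes.2.2.2.2) ∧ calc_static_chunk_sizes (pvDiffWitness_calc_static_chunk_sizes.1) (pvDiffWitness_calc_static_chunk_sizes.2.1) (pvDiffWitness_calc_static_chunk_sizes.2.2.1)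 (pvDiffWitness_calc_static_chunk_sizes.2.2.2.1) (pvDiffWitness_calc_static_chunk_sizes.2.2.2.2) = pvDiffWitnessOut_calc_static_chunk_sizes.1 ∧ calc_static_chunk_sizes_alt (pvDiffWitness_calc_static_chunk_sizes.1) (pvDiffWitness_calc_static_chunk_sizes.2.1) (pvDiffWitness_calc_static_chunk_sizes.2.2.1) (pvDiffWitness_calc_static_chunk_sizes.2.2.2.1) (pvDiffWitness_calc_static_chunk_sizes.2.2.2.2) = pvDiffWitnessOut_calc_static_chunk_sizes.2 ∧ pvDiffWitnessOut_calc_static_chunk_sizes.1 ≠ pvDiffWitnessOut_calc_static_chunk_sizes.2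
def Claim_exact_calc_static_chunk_sizes : Prop := ∀ (seq_length : Int) (chunk_size : Int) (global_mem_size : Int) (temp_beacon_stride : Int) (tem_mem_budget : Int), Dom_calc_static_chunk_sizes seq_length chunk_size global_mem_size temp_beacon_stride tem_mem_budget → Pre_calc_static_chunk_sizes seq_length chunk_size global_mem_size temp_beacon_stride tem_mem_budget → D_calc_static_chunk_sizes seq_length chunk_size global_mem_size temp_beacon_stride tem_mem_budget → calc_static_chunk_sizes seq_length chunk_size global_mem_size temp_beacon_stride tem_mem_budget ≠ calc_static_chunk_sizes_alt seq_length chunk_size global_mem_size temp_beacon_stride tem_mem_budget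

-- ===== LEMMAS AND PROOFS =====

-- A's accumulator num_temp_mem after i iterations.
def tmF (budget nb : Int) : Nat → Int
  | 0 => 0
  | i + 1 => min budget (tmF budget nb i + nb)

-- The value A stores at index k.
def outF (chunk gm nb budget : Int) (k : Nat) : Int :=
  if k = 0 then chunk + (gm + nb) else chunk + (tmF budget nb k + gm) + (gm + nb)

-- Outside the drift corner the accumulator IS the budget-capped accumulation.
lemma tmF_min (budget nb : Int) (h : 0 ≤ nb ∨ nb ≤ budget) :
    ∀ i : Nat, 1 ≤ i → tmF budget nb i = min budget ((i : Int) * nb) := by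
  intro i
  induction i with
  | zero => intro hi; omega
  | succ i ih =>
    intro _
    rcases Nat.eq_zero_or_pos i with h0 | h0
    · subst h0; simp [tmF]
    · have hstep : tmF budget nb (i + 1) = min budget (tmF budget nb i + nb) := rfl
      rw [hstep, ih h0]
      have e : ((i + 1 : Nat) : Int) * nb = (i : Int) * nb + nb := by push_cast; ring
      rw [e]
      by_cases hnb : 0 ≤ nb
      · generalize (i : Int) * nb = A
        omega
      · have hb : nb ≤ budget := by omega
        have h1 : (1 : Int) ≤ (i : Int) := by exact_mod_cast h0
        have hA : (i : Int) * nb ≤ nb := by nlinarith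
        generalize hg : (i : Int) * nb = A at hA ⊢
        omega

lemma getD_append_cons (pre : List Int) (x d : Int) (rest : List Int) :
    (pre ++ x :: rest).getD pre.length d = x := by
  induction pre with
  | nil => rfl
  | cons h t ih => simpa using ih

lemma set_append_cons (pre : List Int) (x v : Int) (rest : List Int) :
    (pre ++ x :: rest).set pre.length v = pre ++ v :: rest := by
  induction pre with
  | nil => rfl
  | cons h t ih => simpa using ih

lemma pyGetD_append_cons (pre : List Int) (x d : Int) (rest : List Int) :
    PySem.List.pyGetD (pre ++ x :: rest) ((pre.length : Nat) : Int) d = x := by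
  rw [PySem.List.pyGetD_natCast]
  exact getD_append_cons pre x d rest

lemma pySetD_append_cons (pre : List Int) (x v : Int) (rest : List Int) :
    PySem.List.pySetD (pre ++ x :: rest) ((pre.length : Nat) : Int) v = pre ++ v :: rest := by
  rw [PySem.List.pySetD_natCast]
  exact set_append_cons pre x v rest

lemma loopA (chunk gm nb budget : Int) (N : Nat) : ∀ n : Nat, n ≤ N →
    (PySem.List.pyRange 0 (n : Int) 1).foldl (stepA gm nb budget) (List.replicate N chunk, 0)
      = ((List.range n).map (outF chunk gm nb budget) ++ List.replicate (N - n) chunk,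
         tmF budget nb n) := by
  intro n
  induction n with
  | zero => intro _; simp [tmF, PySem.List.pyRange_one_eq_nil le_rfl]
  | succ n ih =>
    intro hn
    have hn' : n ≤ N := Nat.le_of_succ_le hn
    have hcast : ((n + 1 : Nat) : Int) = (n : Int) + 1 := by push_cast; ring
    rw [hcast, PySem.List.pyRange_one_succ_right (by positivity), List.foldl_append,
        List.foldl_cons, List.foldl_nil, ih hn']
    have hrep : List.replicate (N - n) chunk = chunk :: List.replicate (N - (n + 1)) chunk := by
      have h : N - n = (N - (n + 1)) + 1 := by omega
      rw [h, List.replicate_succ]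
    have hlen : ((List.range n).map (outF chunk gm nb budget)).length = n := by simp
    rw [hrep]
    have hget : ∀ (x : Int) (l : List Int),
        PySem.List.pyGetD ((List.range n).map (outF chunk gm nb budget) ++ x :: l) ((n : Nat) : Int) 0 = x := by
      intro x l
      have h := pyGetD_append_cons ((List.range n).map (outF chunk gm nb budget)) x 0 l
      rwa [hlen] at h
    have hset : ∀ (x v : Int) (l : List Int),
        PySem.List.pySetD ((List.range n).map (outF chunk gm nb budget) ++ x :: l) ((n : Nat) : Int) v
          = (List.range n).map (outF chunk gm nb budget) ++ v :: l := by
      intro x v l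
      have h := pySetD_append_cons ((List.range n).map (outF chunk gm nb budget)) x v l
      rwa [hlen] at h
    rw [List.range_succ, List.map_append]
    rcases Nat.eq_zero_or_pos n with h0 | h0
    · subst h0
      have hs : ∀ (x v : Int) (l : List Int), PySem.List.pySetD (x :: l) (0 : Int) v = v :: l := by
        intro x v l
        have h := pySetD_append_cons [] x v l
        simpa using h
      simp [stepA, outF, tmF, hs]
    · have hpos : (0 : Int) < ((n : Nat) : Int) := by exact_mod_cast h0
      simp only [stepA]
      rw [if_pos hpos, hget, hset, hget, hset]
      refine Prod.ext ?_ rfl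
      simp only
      rw [List.append_cons ((List.range n).map (outF chunk gm nb budget))]
      congr 1
      simp only [List.map_cons, List.map_nil]
      congr 1
      simp [outF, Nat.pos_iff_ne_zero.mp h0]

-- A's result as a map over indices.
lemma A_as_map (seq_length chunk_size global_mem_size temp_beacon_stride tem_mem_budget : Int) :
    calc_static_chunk_sizes seq_length chunk_size global_mem_size temp_beacon_stride tem_mem_budget
      = (List.range (PySem.Int.floordiv seq_length chunk_size).toNat).map
          (outF chunk_size global_mem_size
            (if temp_beacon_stride > 0 then -(PySem.Int.floordiv (-chunk_size) temp_beacon_stride) else 0)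
            tem_mem_budget) := by
  unfold calc_static_chunk_sizes
  set m := PySem.Int.floordiv seq_length chunk_size with hm
  set nb := (if temp_beacon_stride > 0 then -(PySem.Int.floordiv (-chunk_size) temp_beacon_stride) else 0) with hnb
  simp only
  rcases lt_or_ge m 0 with hneg | hpos
  · rw [PySem.List.pyRange_one_eq_nil hneg.le]
    simp [PySem.List.pyRepeat_singleton, Int.toNat_of_nonpos hneg.le]
  · rw [PySem.List.pyRepeat_singleton]
    have hr : PySem.List.pyRange 0 m 1 = PySem.List.pyRange 0 ((m.toNat : Nat) : Int) 1 := by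
      rw [Int.toNat_of_nonneg hpos]
    rw [hr, loopA chunk_size global_mem_size nb tem_mem_budget m.toNat m.toNat le_rfl]
    simp

-- B's result as a map over indices.
lemma B_as_map (seq_length chunk_size global_mem_size temp_beacon_stride tem_mem_budget : Int) :
    calc_static_chunk_sizes_alt seq_length chunk_size global_mem_size temp_beacon_stride tem_mem_budget
      = (List.range (PySem.Int.floordiv seq_length chunk_size).toNat).map
          (fun k : Nat =>
            let nb := (if temp_beacon_stride > 0 then -(PySem.Int.floordiv (-chunk_size) temp_beacon_stride) else 0)
            if (k : Int) = 0 then chunk_size + global_mem_size + nb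
            else chunk_size + global_mem_size + nb + global_mem_size
                   + min tem_mem_budget ((k : Int) * nb)) := by
  unfold calc_static_chunk_sizes_alt
  simp only
  rw [PySem.List.pyRange_one, List.map_map]
  have hz : ((PySem.Int.floordiv seq_length chunk_size) - 0).toNat
      = (PySem.Int.floordiv seq_length chunk_size).toNat := by omega
  rw [hz]
  apply List.map_congr_left
  intro k _
  simp [Function.comp]

lemma fdiv_ge3_iff (a c : Int) (hc : c < 0) :
    3 ≤ PySem.Int.floordiv a c ↔ a ≤ 3 * c := by
  rw [← PySem.Int.floordiv_neg_neg,
      PySem.Int.le_floordiv_iff_mul_le (by omega : (0 : Int) < -c)]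
  omega

lemma ports_eq (seq_length chunk_size global_mem_size temp_beacon_stride tem_mem_budget : Int)
    (hD : ¬ D_calc_static_chunk_sizes seq_length chunk_size global_mem_size temp_beacon_stride tem_mem_budget) :
    calc_static_chunk_sizes seq_length chunk_size global_mem_size temp_beacon_stride tem_mem_budget
      = calc_static_chunk_sizes_alt seq_length chunk_size global_mem_size temp_beacon_stride tem_mem_budget := by
  rw [A_as_map, B_as_map]
  unfold D_calc_static_chunk_sizes at hD
  set m := PySem.Int.floordiv seq_length chunk_size with hm
  set nb := (if temp_beacon_stride > 0 then -(PySem.Int.floordiv (-chunk_size) temp_beacon_stride) else 0) with hnb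
  apply List.map_congr_left
  intro k hk
  have hk' : k < m.toNat := List.mem_range.mp hk
  simp only
  rcases Nat.eq_zero_or_pos k with h0 | h0
  · subst h0
    simp [outF]
    ring
  · have hkz : ((k : Int) ≠ 0) := by
      have : (0 : Int) < (k : Int) := by exact_mod_cast h0
      omega
    rw [if_neg hkz]
    simp only [outF, Nat.pos_iff_ne_zero.mp h0, if_false]
    have htm : tmF tem_mem_budget nb k = min tem_mem_budget ((k : Int) * nb) := by
      by_cases hcase : 0 ≤ nb ∨ nb ≤ tem_mem_budget
      · exact tmF_min tem_mem_budget nb hcase k h0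
      · push_neg at hcase
        obtain ⟨hn, hb⟩ := hcase
        have hs : 0 < temp_beacon_stride := by
          by_contra hsn
          rw [hnb, if_neg hsn] at hn
          omega
        have hnbe : -(PySem.Int.floordiv (-chunk_size) temp_beacon_stride) = nb := by
          rw [hnb, if_pos hs]
        have hbr := (PySem.Int.neg_floordiv_neg_eq_iff_of_pos hs).mp hnbe
        have hc2 : chunk_size ≤ -temp_beacon_stride := by nlinarith [hbr.2]
        have hc3 : tem_mem_budget * temp_beacon_stride < chunk_size := by nlinarith [hbr.1]
        have hm2 : ¬ (seq_length ≤ 3 * chunk_size) := fun h3 => hD ⟨hs, hc2, hc3, h3⟩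
        have hmlt : m < 3 := by
          by_contra hge
          push_neg at hge
          exact hm2 ((fdiv_ge3_iff seq_length chunk_size (by omega)).mp (hm ▸ hge))
        have hk1 : k = 1 := by omega
        subst hk1
        simp [tmF]
    rw [htm]
    ring

-- ===== VERDICT (by name: the statements are the Claim_ definitions above) =====
theorem calc_static_chunk_sizes_spec : Claim_unchanged_calc_static_chunk_sizes := by
  intro s c g t b _ _
  unfold Spec_calc_static_chunk_sizes
  intro hD
  exact ports_eq s c g t b hD

theorem calc_static_chunk_sizes_changed : Claim_changed_calc_static_chunk_sizes := by
  unfold Claim_changed_calc_static_chunk_sizes; decide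

theorem calc_static_chunk_sizes_tight : Claim_exact_calc_static_chunk_sizes := by
  intro seq_length chunk_size global_mem_size temp_beacon_stride tem_mem_budget _ _ hD heq
  rw [A_as_map, B_as_map] at heq
  unfold D_calc_static_chunk_sizes at hD
  set m := PySem.Int.floordiv seq_length chunk_size with hm
  set nb := (if temp_beacon_stride > 0 then -(PySem.Int.floordiv (-chunk_size) temp_beacon_stride) else 0) with hnb
  obtain ⟨hs, hc2, hc3, hseq⟩ := hD
  have hnbe : -(PySem.Int.floordiv (-chunk_size) temp_beacon_stride) = nb := by
    rw [hnb, if_pos hs]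
  have hbr := (PySem.Int.neg_floordiv_neg_eq_iff_of_pos hs).mp hnbe
  have hnbneg : nb < 0 := by nlinarith [hbr.1]
  have hblt : tem_mem_budget < nb := by nlinarith [hbr.2]
  have hm3 : 3 ≤ m := hm ▸ (fdiv_ge3_iff seq_length chunk_size (by omega)).mpr hseq
  have h2 : 2 < m.toNat := by omega
  have := congrArg (fun l => l[2]?) heq
  simp [h2, outF, tmF] at this
  omega
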